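-- pv_equiv track=rewrite | github.com/nikitagupta9989/MOSAIC-24_PS2 | your_solution.py | init_n_gram
-- ===== SOURCE A (Python) =====
-- import collections
--
-- def init_n_gram(n, full_dictionary):
--         n_gram = {-1:[]}
--         for word in full_dictionary:
--             single_word_gram = gen_n_gram(word, n)
--             if len(word) not in n_gram:
--                 n_gram[len(word)] = single_word_gram
--             else:
--                 n_gram[len(word)].extend(single_word_gram)
--             n_gram[-1].extend(single_word_gram)
--         res = {}
--         for key in n_gram.keys():
--             res[key] = collections.Counter(n_gram[key])
--         return res
--
-- def gen_n_gram(word, n):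
--         n_gram = []
--         for i in range(n, len(word)+1):
--             if word[i-n:i] not in n_gram:
--                 n_gram.append(word[i-n:i])
--         return n_gram
-- ===== SOURCE B (Python) =====
-- import collections
--
-- def init_n_gram(n, full_dictionary):
--     def grams(word):
--         return dict.fromkeys(word[i - n:i] for i in range(n, len(word) + 1))
--     res = {-1: collections.Counter(g for w in full_dictionary for g in grams(w))}
--     for L in dict.fromkeys(len(w) for w in full_dictionary):
--         res[L] = collections.Counter(g for w in full_dictionary if len(w) == L for g in grams(w))
--     return res
-- ===== Notes on version B (the rewrite author's own statement) =====
-- stated objective: alternative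
-- what changed: B inverts the traversal: instead of A's single pass that buckets per-word gram lists by length and then converts every bucket to a Counter in a second loop, B first builds the global -1 Counter from one flattened generator, then loops over the DISTINCT word lengths and builds each length's Counter directly by re-filtering the dictionary, never materialising intermediate gram lists or a list-valued dict.
import Mathlib
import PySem

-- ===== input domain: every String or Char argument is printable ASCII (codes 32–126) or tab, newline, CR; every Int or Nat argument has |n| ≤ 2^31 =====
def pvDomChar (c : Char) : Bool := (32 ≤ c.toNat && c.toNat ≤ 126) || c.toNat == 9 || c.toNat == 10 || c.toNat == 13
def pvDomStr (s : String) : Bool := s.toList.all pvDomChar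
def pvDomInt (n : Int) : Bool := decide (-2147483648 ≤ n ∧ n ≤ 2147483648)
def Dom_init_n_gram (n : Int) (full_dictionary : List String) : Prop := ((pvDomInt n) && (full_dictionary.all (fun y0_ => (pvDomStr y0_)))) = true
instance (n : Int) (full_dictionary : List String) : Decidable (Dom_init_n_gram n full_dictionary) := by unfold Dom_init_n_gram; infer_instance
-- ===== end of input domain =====

-- B inverts A's traversal: it builds the global -1 Counter from one flattened pass and then builds
-- each distinct length's Counter directly by filtering the dictionary, with no intermediate gram
-- lists and no second conversion loop (objective: alternative decomposition, same results).

-- ===== PORT A =====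
-- helper gen_n_gram(word, n): dedup-by-scan list of n-grams of word
def gen_n_gram (word : String) (n : Int) : List String :=
  (PySem.List.pyRange n ((PySem.Str.len word : Int) + 1) 1).foldl
    (fun acc i =>
      let g := PySem.Str.slice word (some (i - n)) (some i)
      if g ∉ acc then acc ++ [g] else acc) []

-- the body of A's first loop, one word at a time
def stepA (n : Int) (d : PySem.Dict Int (List String)) (word : String) : PySem.Dict Int (List String) :=
  let single_word_gram := gen_n_gram word n
  let L : Int := (PySem.Str.len word : Int)
  let d := if d.contains L then d.modify L [] (· ++ single_word_gram)
           else d.insert L single_word_gram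
  d.modify (-1) [] (· ++ single_word_gram)

def init_n_gram (n : Int) (full_dictionary : List String) : List (Int × List (String × Int)) :=
  let ng : PySem.Dict Int (List String) := PySem.Dict.empty.insert (-1) []
  let ng := full_dictionary.foldl (stepA n) ng
  let res : PySem.Dict Int (PySem.Dict String Int) :=
    ng.keys.foldl (fun r key => r.insert key (PySem.Dict.counter (ng.getD key []))) PySem.Dict.empty
  res.items.map (fun p => (p.1, p.2.items))

-- ===== PORT B =====
-- helper grams(word): list(dict.fromkeys(word[i-n:i] for i in range(n, len(word)+1)))
def pvGrams (n : Int) (word : String) : List String :=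
  PySem.List.dedup ((PySem.List.pyRange n ((PySem.Str.len word : Int) + 1) 1).map
    (fun i => PySem.Str.slice word (some (i - n)) (some i)))

def init_n_gram_alt (n : Int) (full_dictionary : List String) : List (Int × List (String × Int)) :=
  let res : PySem.Dict Int (PySem.Dict String Int) :=
    PySem.Dict.empty.insert (-1)
      (PySem.Dict.counter (full_dictionary.flatMap (fun w => pvGrams n w)))
  let res := (PySem.List.dedup (full_dictionary.map (fun w => (PySem.Str.len w : Int)))).foldl
    (fun r L => r.insert L (PySem.Dict.counter
      ((full_dictionary.filter (fun w => (PySem.Str.len w : Int) == L)).flatMap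
        (fun w => pvGrams n w)))) res
  res.items.map (fun p => (p.1, p.2.items))

-- ===== PRECONDITION & SPEC =====
def Spec_init_n_gram (n : Int) (full_dictionary : List String) (out : List (Int × List (String × Int))) : Prop := out = init_n_gram_alt n full_dictionary
instance (n : Int) (full_dictionary : List String) (out : List (Int × List (String × Int))) : Decidable (Spec_init_n_gram n full_dictionary out) := by unfold Spec_init_n_gram; infer_instance

-- ===== CLAIM (what is proved, stated in full; the proofs are below) =====
def Claim_equal_init_n_gram : Prop := ∀ (n : Int) (full_dictionary : List String), Dom_init_n_gram n full_dictionary → Spec_init_n_gram n full_dictionary (init_n_gram n full_dictionary)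

-- ===== LEMMAS AND PROOFS =====

theorem gen_n_gram_eq_pvGrams (word : String) (n : Int) :
    gen_n_gram word n = pvGrams n word := by
  unfold gen_n_gram pvGrams
  rw [PySem.List.dedup_eq_ofList, ← PySem.Set.update_nil_left,
      PySem.Set.update_map_eq_foldl_add]
  apply PySem.List.foldl_congr_mem
  intro s i _
  rw [PySem.Set.add_eq_ite]
  by_cases h : PySem.Str.slice word (some (i - n)) (some i) ∈ s <;> simp [h]

theorem keys_stepA (n : Int) (d : PySem.Dict Int (List String)) (w : String)
    (h : d.contains (-1) = true) :
    (stepA n d w).keys = PySem.Set.add d.keys ((PySem.Str.len w : Int)) := by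
  unfold stepA PySem.Dict.modify
  set L : Int := (PySem.Str.len w : Int)
  by_cases hc : d.contains L = true
  · have h1 : (d.insert L ((d.getD L []) ++ gen_n_gram w n)).contains (-1) = true := by
      simp [PySem.Dict.contains_insert, h]
    simp [hc, PySem.Dict.keys_insert_of_contains _ _ hc,
      PySem.Dict.keys_insert_of_contains _ _ h1,
      (PySem.Dict.contains_iff_mem_keys d L).mp hc]
  · have h1 : (d.insert L (gen_n_gram w n)).contains (-1) = true := by
      simp [PySem.Dict.contains_insert, h]
    have hL : L ∉ d.keys := fun hm => hc ((PySem.Dict.contains_iff_mem_keys d L).mpr hm)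
    simp [hc, PySem.Dict.keys_insert_of_not_contains _ _ (by simpa using hc),
      PySem.Dict.keys_insert_of_contains _ _ h1, hL]

theorem contains_neg_one_stepA (n : Int) (d : PySem.Dict Int (List String)) (w : String)
    (_h : d.contains (-1) = true) : (stepA n d w).contains (-1) = true := by
  unfold stepA PySem.Dict.modify
  by_cases hc : d.contains ((PySem.Str.len w : Int)) = true <;>
    simp [hc]

theorem getD_stepA (n : Int) (d : PySem.Dict Int (List String)) (w : String) (k : Int) :
    (stepA n d w).getD k [] =
      d.getD k [] ++ (if k = -1 ∨ k = (PySem.Str.len w : Int) then gen_n_gram w n else []) := by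
  unfold stepA
  have hL : ((PySem.Str.len w : Int)) ≠ -1 := by
    simp only [PySem.Str.len]; omega
  set L : Int := (PySem.Str.len w : Int)
  by_cases hk1 : k = -1
  · subst hk1
    by_cases hc : d.contains L = true <;>
      simp [hc, PySem.Dict.getD_modify, PySem.Dict.getD_insert, Ne.symm hL]
  · by_cases hkL : k = L
    · subst hkL
      by_cases hc : d.contains L = true
      · simp [hc, PySem.Dict.getD_modify, hL, PySem.Dict.getD_modify_self]
      · have : d.getD L [] = [] := PySem.Dict.getD_of_not_contains _ _ (by simpa using hc)
        simp [hc, PySem.Dict.getD_modify, hL, this]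
    · by_cases hc : d.contains L = true <;>
        simp [hc, PySem.Dict.getD_modify, hk1, PySem.Dict.getD_insert, hkL]

theorem keys_foldl_stepA (n : Int) (ws : List String) (d : PySem.Dict Int (List String))
    (h : d.contains (-1) = true) :
    (ws.foldl (stepA n) d).keys =
      PySem.Set.update d.keys (ws.map (fun w => (PySem.Str.len w : Int))) := by
  induction ws generalizing d with
  | nil => simp [PySem.Set.update]
  | cons w ws ih =>
    simp only [List.foldl_cons, List.map_cons]
    rw [ih _ (contains_neg_one_stepA n d w h), keys_stepA n d w h]
    simp [PySem.Set.update]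

theorem getD_foldl_stepA (n : Int) (ws : List String) (d : PySem.Dict Int (List String)) (k : Int) :
    (ws.foldl (stepA n) d).getD k [] =
      d.getD k [] ++
        (ws.filter (fun w => k = -1 ∨ k = (PySem.Str.len w : Int))).flatMap (fun w => gen_n_gram w n) := by
  induction ws generalizing d with
  | nil => simp
  | cons w ws ih =>
    simp only [List.foldl_cons]
    rw [ih, getD_stepA]
    by_cases hk : k = -1 ∨ k = (PySem.Str.len w : Int)
    · rw [List.filter_cons_of_pos (by simpa using hk), if_pos hk]
      simp
    · rw [List.filter_cons_of_neg (by simpa using hk), if_neg hk]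
      simp

theorem nodup_keys_foldl_stepA (n : Int) (ws : List String) (d : PySem.Dict Int (List String))
    (hnd : d.keys.Nodup) : (ws.foldl (stepA n) d).keys.Nodup := by
  induction ws generalizing d with
  | nil => exact hnd
  | cons w ws ih =>
    simp only [List.foldl_cons]
    apply ih
    unfold stepA
    by_cases h : d.contains ((PySem.Str.len w : Int)) = true <;>
      simp only [h, if_true, if_false, Bool.false_eq_true, PySem.Dict.modify] <;>
      exact PySem.Dict.nodup_keys_insert _ _ _ (PySem.Dict.nodup_keys_insert _ _ _ hnd)

theorem items_foldl_insert_fresh_id {κ ν : Type} [BEq κ] [LawfulBEq κ]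
    (l : List κ) (v : κ → ν) (d : PySem.Dict κ ν)
    (hfresh : ∀ a ∈ l, d.contains a = false) (hnd : l.Nodup) :
    (l.foldl (fun d a => d.insert a (v a)) d).items = d.items ++ l.map (fun a => (a, v a)) :=
  PySem.Dict.items_foldl_insert_fresh l (fun x => x) v d hfresh (by simpa using hnd)

-- ===== VERDICT (by name: the statement is the Claim_ definition above) =====
theorem init_n_gram_spec : Claim_equal_init_n_gram := by
  intro n ws _
  unfold Spec_init_n_gram init_n_gram init_n_gram_alt
  simp only []
  set d0 : PySem.Dict Int (List String) := PySem.Dict.empty.insert (-1) [] with hd0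
  have hc0 : d0.contains (-1) = true := by decide
  have hnd0 : d0.keys.Nodup := by decide
  set ng := ws.foldl (stepA n) d0 with hng
  have hkeys : ng.keys = -1 :: PySem.List.dedup (ws.map (fun w => (PySem.Str.len w : Int))) := by
    rw [hng, keys_foldl_stepA n ws d0 hc0]
    rw [PySem.Set.update_eq_append_filter, PySem.List.dedup_eq_ofList]
    have : ∀ y ∈ PySem.Set.ofList (ws.map (fun w => (PySem.Str.len w : Int))),
        (!PySem.Set.contains d0.keys y) = true := by
      intro y hy
      have hy' := (PySem.Set.mem_ofList _ _).mp hy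
      obtain ⟨w, _, rfl⟩ := List.mem_map.mp hy'
      have : ((PySem.Str.len w : Int)) ≠ -1 := by
        simp only [PySem.Str.len]; omega
      simp [hd0, PySem.Dict.keys, PySem.Dict.empty, PySem.Dict.insert, PySem.Set.contains, this]
    rw [List.filter_eq_self.mpr this]
    rfl
  have hnd : ng.keys.Nodup := nodup_keys_foldl_stepA n ws d0 hnd0
  have hgetD : ∀ k : Int, ng.getD k [] =
      (ws.filter (fun w => k = -1 ∨ k = (PySem.Str.len w : Int))).flatMap (fun w => gen_n_gram w n) := by
    intro k
    rw [hng, getD_foldl_stepA]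
    have : d0.getD k [] = [] := by
      by_cases hk : k = -1
      · subst hk; decide
      · exact PySem.Dict.getD_of_not_contains _ _ (by simp [hd0, PySem.Dict.contains_insert, hk, PySem.Dict.contains_empty])
    simp [this]
  -- A's second loop over ng.keys (fresh distinct keys into empty) appends its items
  rw [items_foldl_insert_fresh_id ng.keys
        (fun key => PySem.Dict.counter (ng.getD key [])) PySem.Dict.empty
        (fun a _ => PySem.Dict.contains_empty _) hnd]
  -- B's loop over the distinct lengths (fresh keys: none is -1, all distinct)
  have hfreshB : ∀ L ∈ PySem.List.dedup (ws.map (fun w => (PySem.Str.len w : Int))),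
      ((PySem.Dict.empty.insert (-1)
          (PySem.Dict.counter (ws.flatMap (fun w => pvGrams n w))) :
        PySem.Dict Int (PySem.Dict String Int)).contains L) = false := by
    intro L hL
    rw [PySem.List.dedup_eq_ofList] at hL
    obtain ⟨w, _, rfl⟩ := List.mem_map.mp ((PySem.Set.mem_ofList _ _).mp hL)
    have : ((PySem.Str.len w : Int)) ≠ -1 := by
      simp only [PySem.Str.len]; omega
    simp [PySem.Dict.contains_insert, this, PySem.Dict.contains_empty]
  rw [items_foldl_insert_fresh_id _
        (fun L => PySem.Dict.counter
          ((ws.filter (fun w => (PySem.Str.len w : Int) == L)).flatMap (fun w => pvGrams n w)))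
        _ hfreshB (PySem.List.nodup_dedup _)]
  have hinitB : ((PySem.Dict.empty.insert (-1)
      (PySem.Dict.counter (ws.flatMap (fun w => pvGrams n w))) :
        PySem.Dict Int (PySem.Dict String Int))).items =
      [(-1, PySem.Dict.counter (ws.flatMap (fun w => pvGrams n w)))] := rfl
  have hinitA : (PySem.Dict.empty : PySem.Dict Int (PySem.Dict String Int)).items = [] := rfl
  rw [hinitB, hinitA, hkeys]
  simp only [List.map_cons, List.map_map, List.map_append, List.nil_append,
    List.singleton_append, List.map_nil]
  congr 1
  · -- the -1 entry
    have hneg : ng.getD (-1) [] = ws.flatMap (fun w => pvGrams n w) := by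
      rw [hgetD (-1)]
      have hf : ws.filter (fun w => decide ((-1 : Int) = -1 ∨ (-1 : Int) = (PySem.Str.len w : Int))) = ws := by
        apply List.filter_eq_self.mpr; intro w _; simp
      rw [hf]
      simp only [gen_n_gram_eq_pvGrams]
    rw [hneg]
  · -- the per-length entries
    apply List.map_congr_left
    intro L hL
    rw [PySem.List.dedup_eq_ofList] at hL
    obtain ⟨w0, _, rfl⟩ := List.mem_map.mp ((PySem.Set.mem_ofList _ _).mp hL)
    have hLne : ((PySem.Str.len w0 : Int)) ≠ -1 := by
      simp only [PySem.Str.len]; omega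
    set L : Int := (PySem.Str.len w0 : Int)
    have hval : ng.getD L [] =
        (ws.filter (fun w => (PySem.Str.len w : Int) == L)).flatMap (fun w => pvGrams n w) := by
      rw [hgetD L]
      have hfeq : ws.filter (fun w => decide (L = -1 ∨ L = (PySem.Str.len w : Int))) =
          ws.filter (fun w => (PySem.Str.len w : Int) == L) := by
        apply List.filter_congr
        intro w _
        simp only [PySem.Str.len]
        by_cases h : ((w.length : Int)) = L
        · rw [← h]; simp
        · have h2 : L ≠ ((w.length : Int)) := fun e => h e.symm
          simp [hLne, h2, h]
      rw [hfeq]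
      simp only [gen_n_gram_eq_pvGrams]
    simp [Function.comp_def, hval]
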